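-- pv_equiv track=rewrite | github.com/hernyyan/rrrocky | backend/app/utils/text_utils.py | markdown_body_word_count
-- ===== SOURCE A (Python) =====
-- def word_count(text: str) -> int:
--     """Return the number of whitespace-delimited tokens in text."""
--     return len(text.split())
--
-- def markdown_body_word_count(content: str) -> int:
--     """
--     Count words in a company context markdown file, excluding the title line
--     (the first line beginning with '#').
--     """
--     body_lines = []
--     skipped_title = False
--     for line in content.split("\n"):
--         if not skipped_title and line.strip().startswith("#"):
--             skipped_title = True
--             continue
--         body_lines.append(line)
--     body = "\n".join(body_lines).strip()
--     return word_count(body) if body else 0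
-- ===== SOURCE B (Python) =====
-- def markdown_body_word_count(content: str) -> int:
--     # Count all whitespace tokens once; subtract the first title line's tokens.
--     total = len(content.split())
--     for line in content.split("\n"):
--         if line.strip().startswith("#"):
--             return total - len(line.split())
--     return total
-- ===== Notes on version B (the rewrite author's own statement) =====
-- stated objective: alternative
-- what changed: Instead of collecting the non-title lines, joining them back into a body string, stripping it and counting its tokens, B counts all whitespace tokens of the whole content once and subtracts the token count of the first title line (early return), exploiting that whitespace-splitting is additive across newlines.
import Mathlib
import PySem

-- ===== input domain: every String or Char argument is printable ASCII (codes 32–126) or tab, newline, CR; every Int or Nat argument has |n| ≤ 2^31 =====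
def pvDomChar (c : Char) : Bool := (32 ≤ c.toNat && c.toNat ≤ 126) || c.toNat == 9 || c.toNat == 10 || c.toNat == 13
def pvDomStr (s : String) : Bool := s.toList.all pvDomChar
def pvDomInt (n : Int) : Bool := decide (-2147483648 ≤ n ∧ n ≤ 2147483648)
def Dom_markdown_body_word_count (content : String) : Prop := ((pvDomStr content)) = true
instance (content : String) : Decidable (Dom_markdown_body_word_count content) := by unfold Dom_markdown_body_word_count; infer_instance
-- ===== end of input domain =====

-- B counts all whitespace tokens of content once and subtracts the first title line's
-- tokens, instead of rebuilding a body string from the surviving lines (alternative decomposition).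

-- ===== PORT A =====
-- A's helper word_count
def pvWordCount (text : String) : Int := ((PySem.Str.split₀ text).length : Int)

def markdown_body_word_count (content : String) : Int :=
  -- content.split("\n"): the separator is the non-empty literal "\n", so split? is always `some`
  let lines := (PySem.Str.split? content "\n").getD []
  let st := lines.foldl
    (fun (st : List String × Bool) line =>
      if !st.2 && PySem.Str.startswith (PySem.Str.strip line) "#" then (st.1, true)
      else (st.1 ++ [line], st.2)) ([], false)
  let body := PySem.Str.strip (PySem.Str.join "\n" st.1)
  if body ≠ "" then pvWordCount body else 0

-- ===== PORT B =====
def markdown_body_word_count_alt (content : String) : Int :=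
  let total : Int := ((PySem.Str.split₀ content).length : Int)
  -- the for-loop with early return: the first line whose strip() starts with '#'
  match ((PySem.Str.split? content "\n").getD []).find?
      (fun line => PySem.Str.startswith (PySem.Str.strip line) "#") with
  | some line => total - ((PySem.Str.split₀ line).length : Int)
  | none => total

-- ===== PRECONDITION & SPEC =====
def Spec_markdown_body_word_count (content : String) (out : Int) : Prop := out = markdown_body_word_count_alt content
instance (content : String) (out : Int) : Decidable (Spec_markdown_body_word_count content out) := by unfold Spec_markdown_body_word_count; infer_instance

-- ===== CLAIM (what is proved, stated in full; the proofs are below) =====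
def Claim_equal_markdown_body_word_count : Prop := ∀ (content : String), Dom_markdown_body_word_count content → Spec_markdown_body_word_count content (markdown_body_word_count content)

-- ===== LEMMAS AND PROOFS =====

-- word count of a char list / of a string
def pvWC (l : List Char) : Nat := (PySem.Chars.split₀ l).length
def pvWCS (s : String) : Nat := pvWC s.toList

-- split₀.go: the accumulator prepends
theorem pv_go_acc (s : List Char) : ∀ cur acc, PySem.Chars.split₀.go s cur acc = acc.reverse ++ PySem.Chars.split₀.go s cur [] := by
  induction s with
  | nil =>
    intro cur acc
    rw [PySem.Chars.split₀.go.eq_def, PySem.Chars.split₀.go.eq_def]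
    dsimp only
    split_ifs <;> simp
  | cons c rest ih =>
    intro cur acc
    rw [PySem.Chars.split₀.go.eq_def]
    conv_rhs => rw [PySem.Chars.split₀.go.eq_def]
    dsimp only
    split_ifs with h1 h2
    · rw [ih [] acc]
    · rw [ih [] (cur.reverse :: acc), ih [] [cur.reverse]]; simp
    · rw [ih (c :: cur) acc]

theorem pv_split_ws_go {c : Char} (hc : PySem.Chars.isspace c = true) (b : List Char) :
    ∀ (a cur : List Char), PySem.Chars.split₀.go (a ++ c :: b) cur [] = PySem.Chars.split₀.go a cur [] ++ PySem.Chars.split₀ b := by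
  intro a
  induction a with
  | nil =>
    intro cur
    rw [List.nil_append, PySem.Chars.split₀.go.eq_def]
    conv_rhs => rw [PySem.Chars.split₀.go.eq_def]
    dsimp only
    rw [if_pos hc]
    split_ifs with h1
    · simp [PySem.Chars.split₀]
    · rw [pv_go_acc]; simp [PySem.Chars.split₀]
  | cons x a' ih =>
    intro cur
    rw [List.cons_append, PySem.Chars.split₀.go.eq_def]
    conv_rhs => rw [PySem.Chars.split₀.go.eq_def]
    dsimp only
    split_ifs with h1 h2
    · exact ih []
    · rw [pv_go_acc, ih [], pv_go_acc a' [] [cur.reverse]]; simp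
    · exact ih (x :: cur)

-- splitting at a whitespace character is additive
theorem pv_split_ws {c : Char} (hc : PySem.Chars.isspace c = true) (a b : List Char) :
    PySem.Chars.split₀ (a ++ c :: b) = PySem.Chars.split₀ a ++ PySem.Chars.split₀ b := by
  simpa [PySem.Chars.split₀] using pv_split_ws_go hc b a []

theorem pv_split_nil : PySem.Chars.split₀ ([] : List Char) = [] := by
  simp [PySem.Chars.split₀, PySem.Chars.split₀.go]

theorem pv_split_cons_ws {c : Char} (hc : PySem.Chars.isspace c = true) (s : List Char) :
    PySem.Chars.split₀ (c :: s) = PySem.Chars.split₀ s := by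
  simpa [pv_split_nil] using pv_split_ws hc [] s

theorem pv_split_concat_ws {c : Char} (hc : PySem.Chars.isspace c = true) (s : List Char) :
    PySem.Chars.split₀ (s ++ [c]) = PySem.Chars.split₀ s := by
  simpa [pv_split_nil] using pv_split_ws hc s []

theorem pv_split_lstrip (s : List Char) : PySem.Chars.split₀ (PySem.Chars.lstrip s) = PySem.Chars.split₀ s := by
  induction s with
  | nil => rfl
  | cons c r ih =>
    by_cases h : PySem.Chars.isspace c = true
    · rw [pv_split_cons_ws h, PySem.Chars.lstrip, List.dropWhile_cons_of_pos h]
      exact ih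
    · rw [PySem.Chars.lstrip, List.dropWhile_cons_of_neg h]

theorem pv_split_rstrip (s : List Char) : PySem.Chars.split₀ (PySem.Chars.rstrip s) = PySem.Chars.split₀ s := by
  induction s using List.reverseRecOn with
  | nil => rfl
  | append_singleton a x ih =>
    by_cases h : PySem.Chars.isspace x = true
    · rw [pv_split_concat_ws h]
      rw [PySem.Chars.rstrip, List.reverse_append, List.reverse_singleton, List.singleton_append,
        List.dropWhile_cons_of_pos h]
      exact ih
    · rw [PySem.Chars.rstrip, List.reverse_append, List.reverse_singleton, List.singleton_append,
        List.dropWhile_cons_of_neg h]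
      simp

-- stripping never changes the whitespace tokens
theorem pv_split_strip (s : List Char) : PySem.Chars.split₀ (PySem.Chars.strip s) = PySem.Chars.split₀ s := by
  rw [PySem.Chars.strip, pv_split_rstrip, pv_split_lstrip]

-- splitOn.go: the accumulator prepends
theorem pv_sgo_acc (sep : List Char) (fuel : Nat) : ∀ l cur acc,
    PySem.Chars.splitOn.go sep fuel l cur acc = acc.reverse ++ PySem.Chars.splitOn.go sep fuel l cur [] := by
  induction fuel with
  | zero =>
    intro l cur acc
    rw [PySem.Chars.splitOn.go.eq_def]
    conv_rhs => rw [PySem.Chars.splitOn.go.eq_def]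
    simp
  | succ f ih =>
    intro l cur acc
    cases l with
    | nil =>
      rw [PySem.Chars.splitOn.go.eq_def]
      conv_rhs => rw [PySem.Chars.splitOn.go.eq_def]
      simp
    | cons c rest =>
      rw [PySem.Chars.splitOn.go.eq_def]
      conv_rhs => rw [PySem.Chars.splitOn.go.eq_def]
      dsimp only
      split_ifs with h1
      · rw [ih _ [] (cur.reverse :: acc), ih _ [] [cur.reverse]]; simp
      · rw [ih rest (c :: cur) acc]

theorem pv_sgo_ne_nil (sep : List Char) (fuel : Nat) : ∀ l cur,
    PySem.Chars.splitOn.go sep fuel l cur [] ≠ [] := by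
  induction fuel with
  | zero => intro l cur; rw [PySem.Chars.splitOn.go.eq_def]; simp
  | succ f ih =>
    intro l cur
    cases l with
    | nil => rw [PySem.Chars.splitOn.go.eq_def]; simp
    | cons c rest =>
      rw [PySem.Chars.splitOn.go.eq_def]
      dsimp only
      split_ifs with h1
      · rw [pv_sgo_acc]; simp
      · exact ih rest (c :: cur)

theorem pv_join_sgo (sep : List Char) (hsep : sep ≠ []) (fuel : Nat) : ∀ l cur, l.length < fuel →
    PySem.Chars.join sep (PySem.Chars.splitOn.go sep fuel l cur []) = cur.reverse ++ l := by
  induction fuel with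
  | zero => intro l cur h; omega
  | succ f ih =>
    intro l cur h
    cases l with
    | nil =>
      rw [PySem.Chars.splitOn.go.eq_def]
      simp [PySem.Chars.join_singleton]
    | cons c rest =>
      rw [PySem.Chars.splitOn.go.eq_def]
      dsimp only
      split_ifs with h1
      · rw [pv_sgo_acc]
        have hpre : sep <+: (c :: rest) := List.isPrefixOf_iff_prefix.mp h1
        obtain ⟨t, ht⟩ := hpre
        have hdrop : (c :: rest).drop sep.length = t := by
          rw [← ht]; simp
        have hlen : t.length < f := by
          have h2 := congrArg List.length ht
          have h3 : 0 < sep.length := List.length_pos_of_ne_nil hsep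
          simp at h2 h
          omega
        obtain ⟨x, xs, hx⟩ := List.exists_cons_of_ne_nil (pv_sgo_ne_nil sep f ((c :: rest).drop sep.length) [])
        rw [List.reverse_singleton, List.singleton_append, hx, PySem.Chars.join_cons_cons, ← hx]
        rw [hdrop, ih t [] hlen]
        rw [List.reverse_nil, List.nil_append, List.append_assoc, ht]
      · have : rest.length < f := by simp at h; omega
        rw [ih rest (c :: cur) this]
        simp

-- joining the '\n'-split back gives the original char list
theorem pv_join_splitOn (l : List Char) :
    PySem.Chars.join ['\n'] (PySem.Chars.splitOn l ['\n']) = l := by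
  rw [PySem.Chars.splitOn]
  simpa using pv_join_sgo ['\n'] (by simp) (l.length + 1) l [] (by omega)

-- word count distributes over a '\n'-join
theorem pv_wc_join (L : List (List Char)) :
    pvWC (PySem.Chars.join ['\n'] L) = (L.map pvWC).sum := by
  induction L with
  | nil => simp [PySem.Chars.join_nil, pvWC, pv_split_nil]
  | cons p rest ih =>
    cases rest with
    | nil => simp [PySem.Chars.join_singleton]
    | cons q r =>
      rw [PySem.Chars.join_cons_cons, List.append_assoc, List.singleton_append]
      simp only [pvWC] at *
      rw [pv_split_ws (by decide) p _]
      simp [ih, pvWC]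

-- once the title is skipped, A's fold appends every remaining line
theorem pv_fold_true (lines : List String) : ∀ bl,
    lines.foldl (fun (st : List String × Bool) line =>
      if !st.2 && PySem.Str.startswith (PySem.Str.strip line) "#" then (st.1, true)
      else (st.1 ++ [line], st.2)) (bl, true) = (bl ++ lines, true) := by
  induction lines with
  | nil => intro bl; simp
  | cons c rest ih =>
    intro bl
    rw [List.foldl_cons]
    simp only [Bool.not_true, Bool.false_and, Bool.false_eq_true, if_false]
    rw [ih (bl ++ [c])]
    simp

-- the word-count balance of A's fold: kept lines + the first title line = all lines
theorem pv_fold_sum (lines : List String) : ∀ bl,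
    (((lines.foldl (fun (st : List String × Bool) line =>
        if !st.2 && PySem.Str.startswith (PySem.Str.strip line) "#" then (st.1, true)
        else (st.1 ++ [line], st.2)) (bl, false)).1.map pvWCS).sum : Nat)
      + (match lines.find? (fun line => PySem.Str.startswith (PySem.Str.strip line) "#") with
         | some t => pvWCS t | none => 0)
    = (bl.map pvWCS).sum + (lines.map pvWCS).sum := by
  induction lines with
  | nil => intro bl; simp
  | cons c rest ih =>
    intro bl
    by_cases h : PySem.Str.startswith (PySem.Str.strip c) "#" = true
    · rw [List.foldl_cons]
      simp only [Bool.not_false, Bool.true_and, h, if_true]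
      rw [pv_fold_true rest bl]
      simp only [List.find?_cons, h]
      simp only [List.map_append, List.sum_append, List.map_cons, List.sum_cons]
      omega
    · rw [List.foldl_cons]
      rw [Bool.not_eq_true] at h
      simp only [Bool.not_false, Bool.true_and, h, Bool.false_eq_true, if_false]
      rw [List.find?_cons_of_neg (by simpa using h), ih (bl ++ [c])]
      simp only [List.map_append, List.sum_append, List.map_cons, List.sum_cons, List.map_nil,
        List.sum_nil]
      omega

theorem pv_main (content : String) : markdown_body_word_count content = markdown_body_word_count_alt content := by
  unfold markdown_body_word_count markdown_body_word_count_alt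
  have hsplit : PySem.Str.split? content "\n"
      = some ((PySem.Chars.splitOn content.toList ['\n']).map String.ofList) := by
    simp [PySem.Str.split?, PySem.Chars.split?]
  rw [hsplit]
  simp only [Option.getD_some]
  set lines := (PySem.Chars.splitOn content.toList ['\n']).map String.ofList with hlines
  set st := lines.foldl
    (fun (st : List String × Bool) line =>
      if !st.2 && PySem.Str.startswith (PySem.Str.strip line) "#" then (st.1, true)
      else (st.1 ++ [line], st.2)) ([], false) with hst
  -- A's value is the word sum over the kept lines, regardless of the emptiness test
  have hA : (if PySem.Str.strip (PySem.Str.join "\n" st.1) ≠ "" then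
        pvWordCount (PySem.Str.strip (PySem.Str.join "\n" st.1)) else 0)
      = ((st.1.map pvWCS).sum : Int) := by
    have hwc : pvWordCount (PySem.Str.strip (PySem.Str.join "\n" st.1)) = ((st.1.map pvWCS).sum : Int) := by
      unfold pvWordCount
      rw [PySem.Str.split₀]
      rw [List.length_map, PySem.Str.toList_strip, pv_split_strip, PySem.Str.toList_join]
      have : ("\n" : String).toList = ['\n'] := by decide
      rw [this, show (PySem.Chars.split₀ (PySem.Chars.join ['\n'] (st.1.map String.toList))).length
            = pvWC (PySem.Chars.join ['\n'] (st.1.map String.toList)) from rfl,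
          pv_wc_join, List.map_map]
      rfl
    split_ifs with hne
    · exact hwc
    · rw [not_ne_iff] at hne
      rw [← hwc, hne]
      simp [pvWordCount, PySem.Str.split₀, pv_split_nil]
  rw [hA]
  -- B's total is the word sum over all lines
  have htot : ((PySem.Str.split₀ content).length : Nat) = (lines.map pvWCS).sum := by
    rw [PySem.Str.split₀, List.length_map]
    conv_lhs => rw [← pv_join_splitOn content.toList]
    rw [show (PySem.Chars.split₀ (PySem.Chars.join ['\n'] (PySem.Chars.splitOn content.toList ['\n']))).length
          = pvWC (PySem.Chars.join ['\n'] (PySem.Chars.splitOn content.toList ['\n'])) from rfl, pv_wc_join]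
    rw [hlines, List.map_map]
    apply congrArg
    apply List.map_congr_left
    intro x _
    simp [pvWCS]
  have hbal := pv_fold_sum lines []
  rw [← hst] at hbal
  simp only [List.map_nil, List.sum_nil, Nat.zero_add] at hbal
  cases hfind : lines.find? (fun line => PySem.Str.startswith (PySem.Str.strip line) "#") with
  | none =>
    rw [hfind] at hbal
    simp only [htot]
    simp at hbal
    show ((List.map pvWCS st.1).sum : Int) = ((lines.map pvWCS).sum : Int)
    exact_mod_cast hbal
  | some t =>
    rw [hfind] at hbal
    simp only [htot]
    have hts : pvWCS t = ((PySem.Str.split₀ t).length : Nat) := by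
      rw [PySem.Str.split₀, List.length_map]; rfl
    simp at hbal
    show ((List.map pvWCS st.1).sum : Int) = ((lines.map pvWCS).sum : Int) - ((PySem.Str.split₀ t).length : Int)
    omega

-- ===== VERDICT (by name: the statement is the Claim_ definition above) =====
theorem markdown_body_word_count_spec : Claim_equal_markdown_body_word_count := by
  intro content _
  unfold Spec_markdown_body_word_count
  exact pv_main content
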